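-- pv_equiv track=rewrite | github.com/TerrainBento/terrainbento | tests/test_fancy_output_intervals_generic.py | generate_previous_list
-- ===== SOURCE A (Python) =====
-- def generate_previous_list(next_list):
--     """
--     Generate the expected list of previous values given a list of next values.
--     Lags the next list, holds the last valid number, and adds None to the
--     front. e.g.
--     [0,1,2,None,None,None] -> [None, 0,1,2,2,2]
--     """
--     # Add none and lag the list
--     previous_list = [None] + next_list[:-1]
--
--     # Hold the last valid number by replacing None with last valid number
--     idx_last_valid = 1
--     for i in range(1, len(previous_list)):
--         if previous_list[i] is None:
--             previous_list[i] = previous_list[idx_last_valid]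
--         else:
--             idx_last_valid = i
--
--     assert len(next_list) == len(previous_list)
--     return previous_list
-- ===== SOURCE B (Python) =====
-- def generate_previous_list(next_list):
--     # Per-position backward search: previous[i] is the most recent non-None
--     # value strictly before position i in next_list (None if there is none).
--     def last_valid_before(i):
--         for j in range(i - 1, -1, -1):
--             if next_list[j] is not None:
--                 return next_list[j]
--         return None
--
--     previous_list = [last_valid_before(i) for i in range(len(next_list))]
--     assert len(next_list) == len(previous_list)
--     return previous_list
-- ===== Notes on version B (the rewrite author's own statement) =====
-- stated objective: alternative
-- what changed: Replaces A's single forward fill pass (shift, then carry the last valid index through the list) with a per-position backward search: each output element is computed independently as the most recent non-None value strictly before that index.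
import Mathlib
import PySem

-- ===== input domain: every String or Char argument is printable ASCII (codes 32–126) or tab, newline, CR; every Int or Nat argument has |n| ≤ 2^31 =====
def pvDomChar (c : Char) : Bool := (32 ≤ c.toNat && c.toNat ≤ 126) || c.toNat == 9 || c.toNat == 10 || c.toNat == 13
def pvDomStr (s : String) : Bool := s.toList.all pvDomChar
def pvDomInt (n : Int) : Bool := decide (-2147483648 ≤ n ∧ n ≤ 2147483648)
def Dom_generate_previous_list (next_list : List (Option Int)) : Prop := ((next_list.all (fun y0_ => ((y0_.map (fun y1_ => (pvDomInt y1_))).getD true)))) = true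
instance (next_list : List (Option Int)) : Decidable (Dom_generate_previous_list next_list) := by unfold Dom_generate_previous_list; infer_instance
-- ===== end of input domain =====

-- B replaces A's forward fill pass with an independent per-position backward search (alternative decomposition; not faster).


-- ===== PORT A =====
-- literal transliteration of A: [None] + next_list[:-1], then the index loop with idx_last_valid
def generate_previous_list (next_list : List (Option Int)) : List (Option Int) :=
  let previous_list : List (Option Int) := [none] ++ PySem.List.slice next_list none (some (-1))
  let st :=
    (PySem.List.pyRange 1 (previous_list.length : Int) 1).foldl
      (fun (st : List (Option Int) × Int) i =>
        if (PySem.List.pyGetD st.1 i none).isNone then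
          (PySem.List.pySetD st.1 i (PySem.List.pyGetD st.1 st.2 none), st.2)
        else
          (st.1, i))
      (previous_list, 1)
  st.1

-- ===== PORT B =====
-- B helper: 'for j in range(i-1, -1, -1): if next_list[j] is not None: return next_list[j]' / 'return None'
-- — a first-hit backward scan, i.e. findSome? over the countdown range.
def last_valid_before (next_list : List (Option Int)) (i : Int) : Option Int :=
  (PySem.List.pyRange (i - 1) (-1) (-1)).findSome? (fun j => PySem.List.pyGetD next_list j none)

-- literal transliteration of B: [last_valid_before(i) for i in range(len(next_list))]
def generate_previous_list_alt (next_list : List (Option Int)) : List (Option Int) :=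
  (PySem.List.pyRange 0 (next_list.length : Int) 1).map (last_valid_before next_list)

-- ===== PRECONDITION & SPEC =====
-- Pre_ excludes only the empty list, on which A's length assertion fails (AssertionError).
def Pre_generate_previous_list (next_list : List (Option Int)) : Prop := next_list ≠ []
instance (next_list : List (Option Int)) : Decidable (Pre_generate_previous_list next_list) := by unfold Pre_generate_previous_list; infer_instance
def pvWitness_generate_previous_list : List (Option Int) := [some 1]

def Spec_generate_previous_list (next_list : List (Option Int)) (out : List (Option Int)) : Prop := out = generate_previous_list_alt next_list
instance (next_list : List (Option Int)) (out : List (Option Int)) : Decidable (Spec_generate_previous_list next_list out) := by unfold Spec_generate_previous_list; infer_instance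

-- ===== CLAIM (what is proved, stated in full; the proofs are below) =====
def Claim_equal_generate_previous_list : Prop := ∀ (next_list : List (Option Int)), Dom_generate_previous_list next_list → Pre_generate_previous_list next_list → Spec_generate_previous_list next_list (generate_previous_list next_list)

-- ===== LEMMAS AND PROOFS =====

-- forward-fill: a common characterisation both programs are reduced to
def ffill : Option Int → List (Option Int) → List (Option Int)
  | _, [] => []
  | last, x :: xs =>
    let y := if x.isSome then x else last
    y :: ffill y xs

-- ---- A-side reduction (A's in-place index loop computes none :: ffill none (dropLast)) ----

theorem loopA (rest : List (Option Int)) :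
    ∀ (done : List (Option Int)) (idx : Int) (v : Option Int),
      0 ≤ idx → idx.toNat < done.length → done[idx.toNat]? = some v →
      ((PySem.List.pyRange (done.length : Int) ((done.length : Int) + (rest.length : Int)) 1).foldl
        (fun (st : List (Option Int) × Int) i =>
          if (PySem.List.pyGetD st.1 i none).isNone then
            (PySem.List.pySetD st.1 i (PySem.List.pyGetD st.1 st.2 none), st.2)
          else
            (st.1, i))
        (done ++ rest, idx)).1 = done ++ ffill v rest := by
  induction rest with
  | nil =>
    intro done idx v _ _ _
    rw [PySem.List.pyRange_one_eq_nil (by simp)]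
    simp [ffill]
  | cons x xs ih =>
    intro done idx v h0 hlt hv
    rw [PySem.List.pyRange_one_cons (by simp only [List.length_cons]; push_cast; omega)]
    simp only [List.foldl_cons]
    have hget : PySem.List.pyGetD (done ++ x :: xs) (done.length : Int) none = x := by
      simp [PySem.List.pyGetD]
    have hgidx : PySem.List.pyGetD (done ++ x :: xs) idx none = v := by
      simp [PySem.List.pyGetD, PySem.List.pyGet?_of_nonneg _ h0,
        List.getElem?_append_left hlt, hv]
    cases x with
    | none =>
      rw [hget, hgidx]
      rw [if_pos (show (none : Option Int).isNone = true from rfl)]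
      have hset : PySem.List.pySetD (done ++ none :: xs) (done.length : Int) v
          = (done ++ [v]) ++ xs := by
        rw [PySem.List.pySetD_of_nonneg _ _ (by positivity)]
        rw [Int.toNat_natCast, List.set_append_right _ _ (le_refl _)]
        simp
      rw [hset]
      have e2 : ((done.length : Int) + ((none :: xs).length : Int))
          = (((done ++ [v]).length : Int) + (xs.length : Int)) := by
        simp; ring
      have e1 : ((done.length : Int) + 1) = ((done ++ [v]).length : Int) := by simp
      rw [e2, e1]
      rw [ih (done ++ [v]) idx v h0 (by simp; omega)
            (by rw [List.getElem?_append_left hlt]; exact hv)]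
      simp [ffill]
    | some a =>
      rw [hget]
      rw [if_neg (by simp)]
      have ed : done ++ some a :: xs = (done ++ [some a]) ++ xs := by simp
      have e2 : ((done.length : Int) + ((some a :: xs).length : Int))
          = (((done ++ [some a]).length : Int) + (xs.length : Int)) := by
        simp; ring
      have e1 : ((done.length : Int) + 1) = ((done ++ [some a]).length : Int) := by simp
      rw [ed, e2, e1]
      rw [ih (done ++ [some a]) (done.length : Int) (some a) (by positivity)
            (by simp) (by simp)]
      simp [ffill]

theorem ffill_none_cons (y : Option Int) (t : List (Option Int)) :
    ffill none (y :: t) = y :: ffill y t := by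
  cases y <;> simp [ffill]

theorem gpl_eq_ffill (next_list : List (Option Int)) :
    generate_previous_list next_list = none :: ffill none next_list.dropLast := by
  unfold generate_previous_list
  rw [PySem.List.slice_to_neg_one]
  cases hdl : next_list.dropLast with
  | nil =>
    have h1 : ((([none] ++ ([] : List (Option Int))).length : Int)) = 1 := by simp
    simp only [h1]
    rw [PySem.List.pyRange_one_eq_nil (le_refl 1)]
    simp [ffill]
  | cons y t =>
    simp only [List.singleton_append]
    have hlen : (((none :: y :: t : List (Option Int)).length : Int)) = 2 + (t.length : Int) := by
      simp; ring
    rw [hlen, PySem.List.pyRange_one_cons (by omega)]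
    simp only [List.foldl_cons]
    have hget1 : PySem.List.pyGetD (none :: y :: t : List (Option Int)) 1 none = y := by
      simp [PySem.List.pyGetD]
    rw [hget1]
    have hstep :
        (if y.isNone then
          (PySem.List.pySetD (none :: y :: t : List (Option Int)) 1 y, (1:Int))
        else
          ((none :: y :: t : List (Option Int)), (1:Int))) = ((none :: y :: t : List (Option Int)), (1:Int)) := by
      cases y with
      | none =>
        simp only [Option.isNone_none, if_true]
        rw [PySem.List.pySetD_of_nonneg _ _ (by norm_num)]
        norm_num
      | some a => rw [if_neg (by simp)]
    rw [hstep]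
    have key := loopA t ([none, y]) 1 y (by omega) (by simp) (by simp)
    have h2 : ((([none, y] : List (Option Int)).length : Int)) = 1 + 1 := by simp
    rw [h2] at key
    simp only [List.cons_append, List.nil_append] at key
    rw [show (2:Int) + (t.length : Int) = 1 + 1 + (t.length : Int) by ring]
    rw [key, ffill_none_cons]

-- ---- B-side reduction ----

-- The countdown scan of B's helper is findSome? over the reversed prefix.
theorem last_valid_before_eq (next_list : List (Option Int)) (k : Nat) (hk : k ≤ next_list.length) :
    last_valid_before next_list (k : Int) = ((next_list.take k).reverse).findSome? id := by
  unfold last_valid_before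
  induction k with
  | zero =>
    rw [PySem.List.pyRange_neg_one_eq_nil (by norm_num)]
    simp
  | succ m ih =>
    rw [show ((m + 1 : Nat) : Int) - 1 = (m : Int) by push_cast; ring,
        PySem.List.pyRange_neg_one_cons (by omega)]
    simp only [List.findSome?_cons]
    have hm : m < next_list.length := by omega
    have hget : PySem.List.pyGetD next_list (m : Int) none = next_list[m] := by
      rw [PySem.List.pyGetD_eq_getElem _ _ (by omega) (by omega)]
      simp
    have htake : next_list.take (m + 1) = next_list.take m ++ [next_list[m]] := by
      rw [List.take_add_one, List.getElem?_eq_getElem hm]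
      rfl
    rw [hget, htake, List.reverse_append, List.reverse_singleton, List.singleton_append,
        List.findSome?_cons]
    cases hx : next_list[m] with
    | none => simpa [hx] using ih (by omega)
    | some a => simp

-- ffill as a per-position map: element i is the first non-None in the reversed (i+1)-prefix, else last
theorem ffill_eq_map (ys : List (Option Int)) :
    ∀ (last : Option Int),
      ffill last ys
        = (List.range ys.length).map
            (fun i => (((ys.take (i + 1)).reverse).findSome? id).or last) := by
  induction ys with
  | nil => intro last; simp [ffill]
  | cons x t ih =>
    intro last
    simp only [List.length_cons, List.range_succ_eq_map, List.map_cons, List.map_map, ffill]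
    refine congrArg₂ List.cons ?_ ?_
    · cases x <;> simp
    · rw [ih (if x.isSome then x else last)]
      apply List.map_congr_left
      intro i _
      simp only [Function.comp_apply]
      rw [show (x :: t).take (i + 1 + 1) = x :: t.take (i + 1) from rfl]
      rw [List.reverse_cons, List.findSome?_append]
      have hx : List.findSome? id [x] = x := by cases x <;> rfl
      rw [hx, Option.or_assoc]
      cases x <;> simp

theorem gpl_alt_eq_ffill (next_list : List (Option Int)) (hne : next_list ≠ []) :
    generate_previous_list_alt next_list = none :: ffill none next_list.dropLast := by
  unfold generate_previous_list_alt
  rw [PySem.List.pyRange_zero_natCast, List.map_map]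
  have hmap : (List.range next_list.length).map (last_valid_before next_list ∘ Nat.cast)
      = (List.range next_list.length).map
          (fun k => ((next_list.take k).reverse).findSome? id) := by
    apply List.map_congr_left
    intro k hk
    simp only [Function.comp_apply]
    exact last_valid_before_eq next_list k (le_of_lt (List.mem_range.mp hk))
  rw [hmap]
  have hn : 1 ≤ next_list.length := List.length_pos_iff.mpr hne
  rw [ffill_eq_map]
  have hdl : next_list.dropLast.length = next_list.length - 1 := List.length_dropLast
  rw [hdl]
  rw [show next_list.length = (next_list.length - 1) + 1 by omega]
  rw [List.range_succ_eq_map, List.map_cons, List.map_map]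
  refine congrArg₂ List.cons (by simp) ?_
  apply List.map_congr_left
  intro i hi
  have hi' : i < next_list.length - 1 := List.mem_range.mp hi
  simp only [Function.comp_apply]
  have htake : next_list.dropLast.take (i + 1) = next_list.take (i + 1) := by
    rw [List.dropLast_eq_take, List.take_take]
    congr 1
    omega
  rw [htake]
  simp

-- ===== VERDICT (by name: the statement is the Claim_ definition above) =====
theorem generate_previous_list_spec : Claim_equal_generate_previous_list := by
  intro next_list _ hpre
  unfold Spec_generate_previous_list
  rw [gpl_eq_ffill, gpl_alt_eq_ffill next_list hpre]
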